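-- pv_equiv track=rewrite | github.com/tardigrde/thesis | utils/auxiliary.py | split_measurement_lists_at_void
-- ===== SOURCE A (Python) =====
-- def split_measurement_lists_at_void(gps):
--     time = gps['time']
--     last_msrmnt_ts = time[0]
--     to_break = [0]
--     no_measurment_intervals = []
--     for i, t in enumerate(time):
--         if t - last_msrmnt_ts > 4999:
--             to_break.append(i)
--             no_measurment_intervals.append([last_msrmnt_ts, t])
--         last_msrmnt_ts = t
--     for c in list(gps.keys()):
--         l = gps[c]
--         gps[c] = [l[i:j] for i, j in zip(to_break, to_break[1:] + [None])]
--         gps[c] = remove_too_short_sublist(gps[c])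
--     return gps
--
-- def remove_too_short_sublist(list):
--     indices = []
--     for i, sublist in enumerate(list):
--         if len(sublist) < 10:
--             indices.append(i)
--     for i in reversed(indices):
--         del list[i]
--     return list
-- ===== SOURCE B (Python) =====
-- def split_measurement_lists_at_void(gps):
--     time = gps['time']
--     breaks = {i for i, (a, b) in enumerate(zip(time, time[1:]), 1) if b - a > 4999}
--     for c in gps:
--         segments = []
--         cur = []
--         for i, v in enumerate(gps[c]):
--             if i in breaks:
--                 if len(cur) >= 10:
--                     segments.append(cur)
--                 cur = [v]
--             else:
--                 cur.append(v)
--         if len(cur) >= 10: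
--             segments.append(cur)
--         gps[c] = segments
--     return gps
-- ===== Notes on version B (the rewrite author's own statement) =====
-- stated objective: alternative
-- what changed: B computes the gap positions by a pairwise zip of the time list into a set of break indices and rebuilds each column element-by-element, closing (and length-filtering) segments as it walks, instead of A's stateful break-index list, zip-based slicing and reversed-index deletion helper.
-- outside the precondition, e.g. on split_measurement_lists_at_void({}): A raises KeyError, B raises KeyError; on split_measurement_lists_at_void({'time': []}): A raises IndexError, B returns {'time': []}
import Mathlib
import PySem

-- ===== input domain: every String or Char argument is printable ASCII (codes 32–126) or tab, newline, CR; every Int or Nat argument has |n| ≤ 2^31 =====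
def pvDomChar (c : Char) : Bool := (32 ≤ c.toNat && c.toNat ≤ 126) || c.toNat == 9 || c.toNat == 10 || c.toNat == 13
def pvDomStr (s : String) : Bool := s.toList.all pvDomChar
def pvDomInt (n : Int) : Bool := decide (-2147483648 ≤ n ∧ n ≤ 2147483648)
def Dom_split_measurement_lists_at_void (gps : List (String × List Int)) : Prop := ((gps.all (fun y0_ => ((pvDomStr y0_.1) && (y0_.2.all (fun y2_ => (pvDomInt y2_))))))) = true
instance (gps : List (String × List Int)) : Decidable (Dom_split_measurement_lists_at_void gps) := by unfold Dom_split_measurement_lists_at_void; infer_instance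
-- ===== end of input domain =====

-- B detects the gaps by a pairwise zip into a set of break indices and then regroups each
-- column element-by-element at those indices (closing/filtering segments as it goes), instead
-- of A's stateful break-index list, zip slicing and reversed-index deletion helper; both
-- mutate the dict in place in Python, equivalence is about the returned value.

-- ===== PORT A =====
-- del l[i] (index always in range where A uses it; out-of-range leaves l — totality guard only)
def pvDelAt (l : List (List Int)) (i : Int) : List (List Int) :=
  match PySem.List.pop? l i with
  | some r => r.2
  | none => l

def remove_too_short_sublist (xs : List (List Int)) : List (List Int) :=
  let indices : List Int :=
    (PySem.List.enumerate xs 0).foldl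
      (fun acc p => if p.2.length < 10 then acc ++ [p.1] else acc) []
  indices.reverse.foldl pvDelAt xs

-- the body of A's first loop (state = (last_msrmnt_ts, to_break, no_measurment_intervals))
def pvAStep (s : Int × List Int × List (List Int)) (p : Int × Int) : Int × List Int × List (List Int) :=
  if p.2 - s.1 > 4999 then (p.2, s.2.1 ++ [p.1], s.2.2 ++ [[s.1, p.2]]) else (p.2, s.2.1, s.2.2)

-- [l[i:j] for i, j in zip(to_break, to_break[1:] + [None])]
def pvACols (tb : List Int) (l : List Int) : List (List Int) :=
  (tb.zip ((tb.drop 1).map some ++ [none])).map (fun q => PySem.List.slice l (some q.1) q.2)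

def split_measurement_lists_at_void (gps : List (String × List Int)) : List (String × List (List Int)) :=
  let d := PySem.Dict.ofList gps
  let time := d.getD "time" []
  let last0 := (PySem.List.pyGet? time 0).getD 0   -- time[0]; Pre_ excludes the IndexError/KeyError case
  let st := (PySem.List.enumerate time 0).foldl pvAStep (last0, [0], [])
  d.items.map (fun p => (p.1, remove_too_short_sublist (pvACols st.2.1 p.2)))

-- ===== PORT B =====
-- {i for i, (a, b) in enumerate(zip(time, time[1:]), 1) if b - a > 4999}
def pvBAdd (s : PySem.Set Int) (p : Int × (Int × Int)) : PySem.Set Int :=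
  if p.2.2 - p.2.1 > 4999 then PySem.Set.add s p.1 else s

def pvBreaks (time : List Int) : PySem.Set Int :=
  (PySem.List.enumerate (time.zip (PySem.List.slice time (some 1) none)) 1).foldl pvBAdd PySem.Set.empty

-- the body of B's per-column loop (state = (segments, cur))
def pvBGroupStep (bs : PySem.Set Int) (s : List (List Int) × List Int) (p : Int × Int) : List (List Int) × List Int :=
  if PySem.Set.contains bs p.1 then
    ((if 10 ≤ s.2.length then s.1 ++ [s.2] else s.1), [p.2])
  else (s.1, s.2 ++ [p.2])

def pvBGroup (bs : PySem.Set Int) (l : List Int) : List (List Int) :=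
  let r := (PySem.List.enumerate l 0).foldl (pvBGroupStep bs) ([], [])
  if 10 ≤ r.2.length then r.1 ++ [r.2] else r.1

def split_measurement_lists_at_void_alt (gps : List (String × List Int)) : List (String × List (List Int)) :=
  let d := PySem.Dict.ofList gps
  let time := d.getD "time" []
  let bs := pvBreaks time
  d.items.map (fun p => (p.1, pvBGroup bs p.2))

-- ===== PRECONDITION & SPEC =====
-- A raises KeyError when the dict has no 'time' key and IndexError when gps['time'] is empty; Pre_ excludes exactly those.
def Pre_split_measurement_lists_at_void (gps : List (String × List Int)) : Prop :=
  (PySem.Dict.ofList gps).getD "time" [] ≠ []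
instance (gps : List (String × List Int)) : Decidable (Pre_split_measurement_lists_at_void gps) := by
  unfold Pre_split_measurement_lists_at_void; infer_instance

def pvWitness_split_measurement_lists_at_void : (List (String × List Int)) :=
  [("time", [0, 1, 2, 3, 4, 5, 6, 7, 8, 9]), ("lat", [5, 5, 5, 5, 5, 5, 5, 5, 5, 5])]

def Spec_split_measurement_lists_at_void (gps : List (String × List Int)) (out : List (String × List (List Int))) : Prop := out = split_measurement_lists_at_void_alt gps
instance (gps : List (String × List Int)) (out : List (String × List (List Int))) : Decidable (Spec_split_measurement_lists_at_void gps out) := by unfold Spec_split_measurement_lists_at_void; infer_instance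

-- ===== CLAIM (what is proved, stated in full; the proofs are below) =====
def Claim_equal_split_measurement_lists_at_void : Prop := ∀ (gps : List (String × List Int)), Dom_split_measurement_lists_at_void gps → Pre_split_measurement_lists_at_void gps → Spec_split_measurement_lists_at_void gps (split_measurement_lists_at_void gps)

-- ===== LEMMAS AND PROOFS =====

-- the break positions: indices k of ts-elements whose gap from the previous timestamp exceeds 4999
def pvBreaksList : List Int → Int → Int → List Int
  | [], _, _ => []
  | t :: ts, prev, k => (if t - prev > 4999 then [k] else []) ++ pvBreaksList ts t (k + 1)

-- the raw segments: l (a suffix of the column starting at absolute index i0) cut at the breaks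
def pvCutsS : List Int → Int → List Int → List (List Int)
  | [], _, l => [l]
  | b :: bs, i0, l => l.take (b - i0).toNat :: pvCutsS bs b (l.drop (b - i0).toNat)

def pvConsHead (cur : List Int) : List (List Int) → List (List Int)
  | [] => [cur]
  | c :: cs => (cur ++ c) :: cs

-- what B's grouping loop produces: filtered closed segments, cur = the open segment
def pvGrpSpec : List Int → Int → List Int → List Int → List (List Int)
  | [], _, cur, l => if 10 ≤ (cur ++ l).length then [cur ++ l] else []
  | b :: bs, i0, cur, l =>
    match l.drop (b - i0).toNat with
    | [] => if 10 ≤ (cur ++ l).length then [cur ++ l] else []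
    | v :: rest =>
        (if 10 ≤ (cur ++ l.take (b - i0).toNat).length then [cur ++ l.take (b - i0).toNat] else [])
          ++ pvGrpSpec bs (b + 1) [v] rest

theorem pvA_fold (ts : List Int) (prev k : Int) (tb : List Int) (iv : List (List Int)) :
    ((PySem.List.enumerate ts k).foldl pvAStep (prev, tb, iv)).2.1
      = tb ++ pvBreaksList ts prev k := by
  induction ts generalizing prev k tb iv with
  | nil => simp [PySem.List.enumerate_nil, pvBreaksList]
  | cons t ts ih =>
      rw [PySem.List.enumerate_cons, List.foldl_cons]
      by_cases h : t - prev > 4999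
      · simp only [pvAStep, h, if_pos]
        rw [ih]
        simp [pvBreaksList, h]
      · simp only [pvAStep, h, if_neg, not_false_iff]
        rw [ih]
        simp [pvBreaksList, h]

theorem pvB_fold (ts : List Int) (prev k : Int) (s : PySem.Set Int)
    (h : ∀ x ∈ s, x < k) :
    (PySem.List.enumerate ((prev :: ts).zip ts) k).foldl pvBAdd s
      = s ++ pvBreaksList ts prev k := by
  induction ts generalizing prev k s with
  | nil => simp [PySem.List.enumerate_nil, pvBreaksList]
  | cons t ts ih =>
      rw [List.zip_cons_cons, PySem.List.enumerate_cons, List.foldl_cons]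
      by_cases hg : t - prev > 4999
      · have hk : k ∉ s := fun hm => absurd (h k hm) (by omega)
        have : pvBAdd s (k, prev, t) = s ++ [k] := by
          simp [pvBAdd, hg, PySem.Set.add_of_not_mem hk]
        rw [this, ih t (k + 1) (s ++ [k]) (by intro x hx; rcases List.mem_append.mp hx with h1 | h1
                                              · exact lt_trans (h x h1) (by omega)
                                              · simp at h1; omega)]
        simp [pvBreaksList, hg]
      · have : pvBAdd s (k, prev, t) = s := by simp [pvBAdd, hg]
        rw [this, ih t (k + 1) s (fun x hx => lt_trans (h x hx) (by omega))]
        simp [pvBreaksList, hg]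

theorem pvBreaksList_lb (ts : List Int) (prev k : Int) :
    ∀ j ∈ pvBreaksList ts prev k, k ≤ j := by
  induction ts generalizing prev k with
  | nil => simp [pvBreaksList]
  | cons t ts ih =>
      intro j hj
      simp only [pvBreaksList, List.mem_append] at hj
      rcases hj with hj | hj
      · split at hj <;> simp_all
      · exact le_trans (by omega) (ih t (k + 1) j hj)

theorem pvBreaksList_pairwise (ts : List Int) (prev k : Int) :
    (pvBreaksList ts prev k).Pairwise (· < ·) := by
  induction ts generalizing prev k with
  | nil => simp [pvBreaksList]
  | cons t ts ih =>
      simp only [pvBreaksList]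
      split
      · refine List.pairwise_cons.mpr ⟨fun j hj => ?_, ih t (k + 1)⟩
        have := pvBreaksList_lb ts t (k + 1) j hj
        omega
      · simpa using ih t (k + 1)

theorem pvRun (S : PySem.Set Int) (l : List Int) (i0 : Int)
    (segs : List (List Int)) (cur : List Int)
    (h : ∀ j, i0 ≤ j → j < i0 + l.length → PySem.Set.contains S j = false) :
    (PySem.List.enumerate l i0).foldl (pvBGroupStep S) (segs, cur) = (segs, cur ++ l) := by
  induction l generalizing i0 cur with
  | nil => simp [PySem.List.enumerate_nil]
  | cons v t ih =>
      rw [PySem.List.enumerate_cons, List.foldl_cons]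
      have hc : PySem.Set.contains S i0 = false := h i0 le_rfl (by push_cast [List.length_cons]; omega)
      have hc' : i0 ∉ S := by simpa using hc
      have hstep : pvBGroupStep S (segs, cur) (i0, v) = (segs, cur ++ [v]) := by
        simp [pvBGroupStep, hc']
      rw [hstep, ih (i0 + 1) (cur ++ [v]) (fun j h1 h2 => h j (by omega) (by simp at h2 ⊢; omega))]
      simp

theorem pvCuts_nil_filter (bs : List Int) (i0 : Int) :
    (pvCutsS bs i0 []).filter (fun s => decide (10 ≤ s.length)) = [] := by
  induction bs generalizing i0 with
  | nil => simp [pvCutsS]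
  | cons b bs ih => simp [pvCutsS, ih b]

theorem pvCuts_shift (bs : List Int) (b v : Int) (rest : List Int)
    (lb : ∀ b' ∈ bs, b + 1 ≤ b') :
    pvCutsS bs b (v :: rest) = pvConsHead [v] (pvCutsS bs (b + 1) rest) := by
  cases bs with
  | nil => simp [pvCutsS, pvConsHead]
  | cons b2 bs2 =>
      have hb2 : b + 1 ≤ b2 := lb b2 (by simp)
      have h1 : (b2 - b).toNat = (b2 - (b + 1)).toNat + 1 := by omega
      simp only [pvCutsS, pvConsHead, h1, List.take_succ_cons, List.drop_succ_cons,
        List.singleton_append]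

theorem pvConsHead_nil (bs : List Int) (i0 : Int) (l : List Int) :
    pvConsHead [] (pvCutsS bs i0 l) = pvCutsS bs i0 l := by
  cases bs <;> simp [pvCutsS, pvConsHead]

theorem pvGrp_eq_cuts_filter (bs : List Int) (i0 : Int) (cur l : List Int)
    (lb : ∀ b ∈ bs, i0 ≤ b) (pw : bs.Pairwise (· < ·)) :
    pvGrpSpec bs i0 cur l
      = (pvConsHead cur (pvCutsS bs i0 l)).filter (fun s => decide (10 ≤ s.length)) := by
  induction bs generalizing i0 cur l with
  | nil => simp [pvGrpSpec, pvCutsS, pvConsHead, List.filter_cons]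
  | cons b bs ih =>
      have hb : i0 ≤ b := lb b (by simp)
      have lb' : ∀ b' ∈ bs, b + 1 ≤ b' := fun b' hb' => (List.pairwise_cons.mp pw).1 b' hb'
      cases hdrop : l.drop (b - i0).toNat with
      | nil =>
          have hlen : l.length ≤ (b - i0).toNat := by
            have := congrArg List.length hdrop; simp at this; omega
          have htake : l.take (b - i0).toNat = l := List.take_of_length_le hlen
          simp only [pvGrpSpec, hdrop, pvCutsS, pvConsHead, htake, List.filter_cons,
            pvCuts_nil_filter]
          split <;> simp_all
      | cons v rest =>
          have hshift := pvCuts_shift bs b v rest lb'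
          have hih := ih (b + 1) [v] rest (fun b' h => by have := lb' b' h; omega) (List.pairwise_cons.mp pw).2
          simp only [pvGrpSpec, hdrop, pvCutsS, pvConsHead, hshift, List.filter_cons]
          rw [hih]
          split <;> simp_all [pvConsHead]

theorem pvACols_eq_cuts (bs : List Int) (i0 : Int) (L : List Int)
    (h0 : 0 ≤ i0) (lb : ∀ b ∈ bs, i0 ≤ b) (pw : bs.Pairwise (· < ·)) :
    pvACols (i0 :: bs) L = pvCutsS bs i0 (L.drop i0.toNat) := by
  induction bs generalizing i0 with
  | nil =>
      simp [pvACols, pvCutsS, PySem.List.slice_from L h0]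
  | cons b bs ih =>
      have hb : i0 ≤ b := lb b (by simp)
      have hslice : PySem.List.slice L (some i0) (some b)
          = (L.drop i0.toNat).take ((b - i0).toNat) := by
        rw [PySem.List.slice_toNat L h0 (by omega)]
        congr 1
        omega
      have hdd : (L.drop i0.toNat).drop (b - i0).toNat = L.drop b.toNat := by
        rw [List.drop_drop]
        congr 1
        omega
      have hih := ih b (by omega)
        (fun b' h => le_of_lt ((List.pairwise_cons.mp pw).1 b' h))
        (List.pairwise_cons.mp pw).2
      simp only [pvACols, List.drop_succ_cons, List.drop_zero, List.map_cons, List.cons_append,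
        List.zip_cons_cons, List.map_cons] at hih ⊢
      simp only [pvCutsS, hdd]
      rw [← hih, hslice]

theorem pvFold_eq_spec (S : PySem.Set Int) (bs : List Int) (l : List Int) (i0 : Int)
    (cur : List Int) (segs : List (List Int))
    (H : ∀ j, i0 ≤ j → (PySem.Set.contains S j = true ↔ j ∈ bs))
    (lb : ∀ b ∈ bs, i0 ≤ b) (pw : bs.Pairwise (· < ·)) :
    (let r := (PySem.List.enumerate l i0).foldl (pvBGroupStep S) (segs, cur)
     if 10 ≤ r.2.length then r.1 ++ [r.2] else r.1)
      = segs ++ pvGrpSpec bs i0 cur l := by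
  induction bs generalizing l i0 cur segs with
  | nil =>
      have hrun := pvRun S l i0 segs cur (by
        intro j h1 _
        cases hc : PySem.Set.contains S j
        · rfl
        · exact absurd ((H j h1).mp hc) (by simp))
      simp only [hrun, pvGrpSpec]
      split <;> simp
  | cons b bs ih =>
      have hb : i0 ≤ b := lb b (by simp)
      have lb' : ∀ b' ∈ bs, b + 1 ≤ b' := fun b' hb' => (List.pairwise_cons.mp pw).1 b' hb'
      have H' : ∀ j, b + 1 ≤ j → (PySem.Set.contains S j = true ↔ j ∈ bs) := by
        intro j hj
        rw [H j (by omega)]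
        simp only [List.mem_cons]
        constructor
        · rintro (rfl | h) <;> [omega; exact h]
        · exact Or.inr
      set d := (b - i0).toNat with hd
      have hsplit : l = l.take d ++ l.drop d := (List.take_append_drop d l).symm
      have henum : PySem.List.enumerate l i0
          = PySem.List.enumerate (l.take d) i0
            ++ PySem.List.enumerate (l.drop d) (i0 + (l.take d).length) := by
        conv_lhs => rw [hsplit]
        exact PySem.List.enumerate_append _ _ _
      have hnob : ∀ j, i0 ≤ j → j < i0 + ((l.take d).length : Int) →
          PySem.Set.contains S j = false := by
        intro j h1 h2
        have hlen : (l.take d).length ≤ d := by simp [List.length_take]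
        have hjb : j < b := by
          have : ((l.take d).length : Int) ≤ (d : Int) := by exact_mod_cast hlen
          omega
        have hmem := H j h1
        cases hc : PySem.Set.contains S j
        · rfl
        · exfalso
          have := hmem.mp hc
          simp only [List.mem_cons] at this
          rcases this with rfl | hin
          · omega
          · have := lb' j hin; omega
      have hrun := pvRun S (l.take d) i0 segs cur hnob
      rw [henum, List.foldl_append, hrun]
      cases hdrop : l.drop d with
      | nil =>
          have hlen : l.length ≤ d := by
            have := congrArg List.length hdrop; simp at this; omega
          have htake : l.take d = l := List.take_of_length_le hlen
          simp only [PySem.List.enumerate_nil, List.foldl_nil, pvGrpSpec, ← hd, hdrop, htake]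
          split <;> simp
      | cons v rest =>
          have hdl : d < l.length := by
            by_contra hcon
            rw [List.drop_eq_nil_of_le (by omega)] at hdrop
            simp at hdrop
          have hlen : ((l.take d).length : Int) = (d : Int) := by
            simp [List.length_take]; omega
          have hstart : i0 + ((l.take d).length : Int) = b := by
            rw [hlen]; omega
          rw [hstart, PySem.List.enumerate_cons, List.foldl_cons]
          have hcb : PySem.Set.contains S b = true := (H b hb).mpr (by simp)
          have hcb' : b ∈ S := by simpa using hcb
          have hstep : pvBGroupStep S (segs, cur ++ l.take d) (b, v)
              = ((if 10 ≤ (cur ++ l.take d).length then segs ++ [cur ++ l.take d] else segs), [v]) := by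
            simp [pvBGroupStep, hcb']
          rw [hstep]
          rw [ih rest (b + 1) [v] _ H' lb' (List.pairwise_cons.mp pw).2]
          simp only [pvGrpSpec, ← hd, hdrop]
          split <;> simp

-- enumerate at any start is the shifted enumerate at 0
theorem pvEnumerate_shift {α : Type} (xs : List α) (s : Int) :
    PySem.List.enumerate xs s = (PySem.List.enumerate xs 0).map (fun q => (q.1 + s, q.2)) := by
  induction xs generalizing s with
  | nil => simp [PySem.List.enumerate_nil]
  | cons x t ih =>
      rw [PySem.List.enumerate_cons, PySem.List.enumerate_cons, List.map_cons]
      simp only [zero_add]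
      rw [ih (s + 1), ih 1, List.map_map]
      congr 1
      apply List.map_congr_left
      intro a _
      simp [Function.comp]
      ring

-- del at a shifted positive index leaves the head alone (both sides out of range together)
theorem pvDelAt_cons (x : List Int) (l : List (List Int)) (i : Int) (h : 0 ≤ i) :
    pvDelAt (x :: l) (i + 1) = x :: pvDelAt l i := by
  obtain ⟨n, rfl⟩ := Int.eq_ofNat_of_zero_le h
  by_cases hn : n < l.length
  · have h1 : ((n : Int) + 1) = ((n + 1 : Nat) : Int) := by push_cast; ring
    rw [h1, pvDelAt, pvDelAt,
      PySem.List.pop?_natCast (x :: l) (n + 1) (by simpa using hn),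
      PySem.List.pop?_natCast l n hn]
    simp
  · have h2 : PySem.List.pop? l (n : Int) = none := by
      simp only [PySem.List.pop?, PySem.List.pyIdx?]
      split_ifs <;> first | rfl | (exfalso; omega)
    have h3 : PySem.List.pop? (x :: l) ((n : Int) + 1) = none := by
      simp only [PySem.List.pop?, PySem.List.pyIdx?]
      split_ifs with hc1 hc2 <;> first | rfl | (exfalso; simp only [List.length_cons] at hc2; omega) | (exfalso; omega)
    rw [pvDelAt, pvDelAt, h2, h3]

theorem pvDelFold_cons (is : List Int) (x : List Int) (l : List (List Int))
    (h : ∀ i ∈ is, 0 ≤ i) :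
    ((is.map (· + 1)).reverse.foldl pvDelAt (x :: l)) = x :: (is.reverse.foldl pvDelAt l) := by
  induction is with
  | nil => simp
  | cons j rest ih =>
      simp only [List.map_cons, List.reverse_cons, List.foldl_append, List.foldl_cons,
        List.foldl_nil]
      rw [ih (fun i hi => h i (List.mem_cons_of_mem _ hi))]
      exact pvDelAt_cons x _ j (h j (List.mem_cons_self))

theorem pvRemove_eq_filter (xs : List (List Int)) :
    remove_too_short_sublist xs = xs.filter (fun s => decide (10 ≤ s.length)) := by
  induction xs with
  | nil => rfl
  | cons x t ih =>
      have hIH : (((PySem.List.enumerate t 0).filter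
            (fun (p : Int × List Int) => decide (p.2.length < 10))).map Prod.fst).reverse.foldl
            pvDelAt t = t.filter (fun s => decide (10 ≤ s.length)) := by
        rw [← ih, remove_too_short_sublist,
          PySem.List.foldl_append_ite (fun (p : Int × List Int) => p.2.length < 10) Prod.fst]
        simp
      have hpos : ∀ i ∈ ((PySem.List.enumerate t 0).filter
          (fun (p : Int × List Int) => decide (p.2.length < 10))).map Prod.fst, 0 ≤ i := by
        intro i hi
        obtain ⟨p, hp, rfl⟩ := List.mem_map.mp hi
        obtain ⟨k, hk, rfl⟩ := (PySem.List.mem_enumerate_iff t 0 p).mp (List.mem_of_mem_filter hp)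
        simp
      rw [remove_too_short_sublist]
      rw [PySem.List.enumerate_cons, List.foldl_cons]
      rw [PySem.List.foldl_append_ite (fun (p : Int × List Int) => p.2.length < 10) Prod.fst]
      simp only [zero_add]
      rw [pvEnumerate_shift t 1]
      have hfm : (List.filter (fun (p : Int × List Int) => decide (p.2.length < 10))
            ((PySem.List.enumerate t 0).map (fun q => (q.1 + 1, q.2)))).map Prod.fst
          = (((PySem.List.enumerate t 0).filter
              (fun (p : Int × List Int) => decide (p.2.length < 10))).map Prod.fst).map (· + 1) := by
        rw [List.filter_map, List.map_map, List.map_map]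
        rfl
      rw [hfm]
      by_cases hx : x.length < 10
      · simp only [hx, if_pos, List.nil_append, List.reverse_append]
        rw [List.foldl_append]
        rw [pvDelFold_cons _ x t hpos, hIH]
        have hx2 : ¬ (10 ≤ x.length) := by omega
        simp [pvDelAt, PySem.List.pop?_zero_cons, hx2]
      · simp only [hx, if_neg, not_false_iff, List.nil_append]
        rw [pvDelFold_cons _ x t hpos, hIH]
        have hx2 : (10 ≤ x.length) := by omega
        simp [hx2]

-- one column: A's slice-and-delete equals B's regrouping at the break set
theorem pvColumn_eq (t : Int) (ts l : List Int) :
    remove_too_short_sublist (pvACols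
        (((PySem.List.enumerate (t :: ts) 0).foldl pvAStep
            ((PySem.List.pyGet? (t :: ts) 0).getD 0, [0], [])).2.1) l)
      = pvBGroup (pvBreaks (t :: ts)) l := by
  have hget : (PySem.List.pyGet? (t :: ts) (0 : Int)).getD 0 = t := by
    simp [PySem.List.pyGet?, PySem.List.pyIdx?]
  have htb : ((PySem.List.enumerate (t :: ts) 0).foldl pvAStep
      ((PySem.List.pyGet? (t :: ts) 0).getD 0, [0], [])).2.1
      = 0 :: pvBreaksList ts t 1 := by
    rw [hget, PySem.List.enumerate_cons, List.foldl_cons]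
    have hstep : pvAStep (t, [0], ([] : List (List Int))) (0, t) = (t, [0], []) := by
      simp [pvAStep]
    rw [hstep, pvA_fold]
    simp
  have hS : pvBreaks (t :: ts) = pvBreaksList ts t 1 := by
    rw [pvBreaks, PySem.List.slice_from_one]
    simpa using pvB_fold ts t 1 [] (by simp)
  have lb0 : ∀ b ∈ pvBreaksList ts t 1, (0 : Int) ≤ b := by
    intro b hb
    have := pvBreaksList_lb ts t 1 b hb
    omega
  have pw := pvBreaksList_pairwise ts t 1
  have hH : ∀ j, (0 : Int) ≤ j →
      (PySem.Set.contains (pvBreaks (t :: ts)) j = true ↔ j ∈ pvBreaksList ts t 1) := by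
    intro j _
    rw [hS]
    exact PySem.Set.contains_iff _ _
  rw [htb, pvRemove_eq_filter, pvACols_eq_cuts (pvBreaksList ts t 1) 0 l le_rfl lb0 pw]
  rw [pvBGroup, pvFold_eq_spec (pvBreaks (t :: ts)) (pvBreaksList ts t 1) l 0 [] [] hH lb0 pw]
  rw [pvGrp_eq_cuts_filter (pvBreaksList ts t 1) 0 [] l lb0 pw, pvConsHead_nil]
  simp

-- ===== VERDICT (by name: the statement is the Claim_ definition above) =====
theorem split_measurement_lists_at_void_spec : Claim_equal_split_measurement_lists_at_void := by
  unfold Claim_equal_split_measurement_lists_at_void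
  intro gps _ hpre
  unfold Spec_split_measurement_lists_at_void
  unfold split_measurement_lists_at_void split_measurement_lists_at_void_alt
  cases htime : (PySem.Dict.ofList gps).getD "time" [] with
  | nil => exact absurd htime hpre
  | cons t ts =>
      simp only [htime]
      apply List.map_congr_left
      intro p _
      exact congrArg (Prod.mk p.1) (pvColumn_eq t ts p.2)
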